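-- pv_equiv track=rewrite | github.com/MrBrantCode/unitest_baseline | mut_generate/mist_train_cf/cf_87055/solution.py | remove_duplicates_primes
-- ===== SOURCE A (Python) =====
-- def remove_duplicates_primes(arr):
--     def is_prime(n):
--         if n < 2:
--             return False
--         for i in range(2, int(n ** 0.5) + 1):
--             if n % i == 0:
--                 return False
--         return True
--
--     result = []
--     for num in arr:
--         if num not in result and is_prime(num):
--             result.append(num)
--
--     return sorted(result)
-- ===== SOURCE B (Python) =====
-- def remove_duplicates_primes(arr):
--     candidates = sorted({v for v in arr if v >= 2})
--     if not candidates: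
--         return []
--     m = candidates[-1]
--     # integer sqrt of m without floats
--     limit = 0
--     while (limit + 1) * (limit + 1) <= m:
--         limit += 1
--     # sieve table of composites up to limit
--     sieve = [True] * (limit + 1)
--     d = 2
--     while d * d <= limit:
--         for j in range(d * d, limit + 1, d):
--             sieve[j] = False
--         d += 1
--     primes = [i for i in range(2, limit + 1) if sieve[i]]
--
--     def _keep(v):
--         for p in primes:
--             if p * p > v:
--                 return True
--             if v % p == 0:
--                 return False
--         return True
--
--     return [v for v in candidates if _keep(v)]
-- ===== Notes on version B (the rewrite author's own statement) =====
-- stated objective: faster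
-- what changed: B deduplicates via a set sorted once and replaces A's per-element trial division by every integer up to sqrt(v) with a precomputed sieve table of primes up to isqrt(max(arr)), testing each distinct candidate only against that prime table; A's growing-list membership scan disappears.
import Mathlib
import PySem

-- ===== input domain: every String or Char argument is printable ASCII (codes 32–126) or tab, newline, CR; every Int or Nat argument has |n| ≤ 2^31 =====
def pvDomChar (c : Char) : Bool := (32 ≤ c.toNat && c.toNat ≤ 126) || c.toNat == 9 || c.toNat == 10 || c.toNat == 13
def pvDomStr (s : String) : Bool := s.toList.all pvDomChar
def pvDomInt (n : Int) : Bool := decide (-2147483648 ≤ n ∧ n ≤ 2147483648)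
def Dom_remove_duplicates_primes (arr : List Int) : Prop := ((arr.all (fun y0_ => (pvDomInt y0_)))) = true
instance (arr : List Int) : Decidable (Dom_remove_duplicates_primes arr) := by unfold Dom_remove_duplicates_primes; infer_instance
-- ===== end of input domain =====

-- B deduplicates via a set sorted once and tests candidates against a sieve-built table of
-- primes up to isqrt(max(arr)) instead of A's growing-list scan plus full trial division.

-- ===== PORT A =====
-- int(n ** 0.5) is ported as Nat.sqrt n.toNat: exact for 2 ≤ n (the only branch that evaluates
-- it) within the |n| ≤ 2^31 domain, where float sqrt's floor equals the integer sqrt.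
def isPrimeA (n : Int) : Bool :=
  if n < 2 then false
  else
    -- for i in range(2, int(n**0.5)+1): if n % i == 0: return False  ... return True
    (PySem.List.pyRange 2 ((Nat.sqrt n.toNat : Int) + 1) 1).all
      (fun i => !(PySem.Int.mod n i == 0))

def remove_duplicates_primes (arr : List Int) : List Int :=
  PySem.List.sorted
    (arr.foldl
      (fun result num =>
        if !(result.contains num) && isPrimeA num then result ++ [num] else result)
      [])
    (fun x => x) false

-- ===== PORT B =====
-- while (limit + 1) * (limit + 1) <= m: limit += 1
def isqrtLoop (m l : Int) : Int :=
  if _h : (l + 1) * (l + 1) ≤ m then isqrtLoop m (l + 1) else l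
termination_by (m - l).toNat
decreasing_by
  have h1 : l < m := by rcases (le_or_gt 0 l) with h | h <;> nlinarith
  omega

-- while d * d <= limit: for j in range(d*d, limit+1, d): sieve[j] = False; d += 1
-- (the Python list of bools is ported as Array Bool; the indices j are always ≥ 4 and in
-- bounds, so j.toNat and setIfInBounds are exact for Python's sieve[j] = False)
def sieveLoop (limit : Int) (s : Array Bool) (d : Int) : Array Bool :=
  if _h : d * d ≤ limit then
    sieveLoop limit
      ((PySem.List.pyRange (d * d) (limit + 1) d).foldl (fun a j => a.setIfInBounds j.toNat false) s)
      (d + 1)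
  else s
termination_by (limit + 2 - d).toNat
decreasing_by
  have h2 : (0 ≤ d → d ≤ d * d) := by intro hd; nlinarith
  have h3 : (d ≤ 0 → d ≤ d * d) := by intro hd; nlinarith
  omega

-- for p in primes: if p*p > v: return True; if v % p == 0: return False  ... return True
def keepLoop (v : Int) (ps : List Int) : Bool :=
  match ps with
  | [] => true
  | p :: t =>
    if p * p > v then true
    else if PySem.Int.mod v p == 0 then false
    else keepLoop v t

def remove_duplicates_primes_alt (arr : List Int) : List Int :=
  let candidates := PySem.List.sorted (PySem.Set.ofList (arr.filter (fun v => 2 ≤ v))) (fun x => x) false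
  if hc : candidates = [] then []
  else
    let m := candidates.getLast hc          -- candidates[-1] on a non-empty list
    let limit := isqrtLoop m 0
    let sieve := sieveLoop limit (List.replicate (limit + 1).toNat true).toArray 2
    -- [i for i in range(2, limit+1) if sieve[i]]  (i is always in bounds, sieve[i] = getD)
    let primes := (PySem.List.pyRange 2 (limit + 1) 1).filter (fun i => sieve.getD i.toNat false)
    candidates.filter (fun v => keepLoop v primes)

-- ===== PRECONDITION & SPEC =====
def Spec_remove_duplicates_primes (arr : List Int) (out : List Int) : Prop := out = remove_duplicates_primes_alt arr
instance (arr : List Int) (out : List Int) : Decidable (Spec_remove_duplicates_primes arr out) := by unfold Spec_remove_duplicates_primes; infer_instance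

-- ===== CLAIM (what is proved, stated in full; the proofs are below) =====
def Claim_equal_remove_duplicates_primes : Prop := ∀ (arr : List Int), Dom_remove_duplicates_primes arr → Spec_remove_duplicates_primes arr (remove_duplicates_primes arr)

-- ===== LEMMAS AND PROOFS =====

-- the common characterisation of "no divisor d with 2 ≤ d and d*d ≤ n"
def NoSmallDiv (n : Int) : Prop := ∀ d : Int, 2 ≤ d → d * d ≤ n → ¬ d ∣ n

theorem sq_le_iff_le_sqrt (n : Int) (hn : 0 ≤ n) (d : Int) (hd : 0 ≤ d) :
    d ≤ (Nat.sqrt n.toNat : Int) ↔ d * d ≤ n := by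
  have h := Nat.le_sqrt (m := d.toNat) (n := n.toNat)
  have h1 : (d.toNat : Int) = d := by omega
  have h2 : (n.toNat : Int) = n := by omega
  constructor
  · intro hle
    have : d.toNat ≤ Nat.sqrt n.toNat := by omega
    have := h.1 this
    have : (d.toNat * d.toNat : Int) ≤ (n.toNat : Int) := by exact_mod_cast this
    rw [h1, h2] at this; linarith
  · intro hle
    have : d.toNat * d.toNat ≤ n.toNat := by
      have : ((d.toNat * d.toNat : Nat) : Int) ≤ ((n.toNat : Nat) : Int) := by
        push_cast; rw [h1, h2]; linarith
      exact_mod_cast this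
    have := h.2 this
    calc d = (d.toNat : Int) := h1.symm
    _ ≤ (Nat.sqrt n.toNat : Int) := by exact_mod_cast this

theorem isPrimeA_iff (n : Int) : isPrimeA n = true ↔ 2 ≤ n ∧ NoSmallDiv n := by
  unfold isPrimeA NoSmallDiv
  by_cases hn : n < 2
  · simp only [hn, if_true, Bool.false_eq_true, false_iff]
    rintro ⟨h2, -⟩; omega
  · simp only [hn, if_false, List.all_eq_true]
    have hn0 : (0:Int) ≤ n := by omega
    constructor
    · intro h
      refine ⟨by omega, fun d h2 hdd hdvd => ?_⟩
      have hmem : d ∈ PySem.List.pyRange 2 ((Nat.sqrt n.toNat : Int) + 1) 1 := by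
        rw [PySem.List.mem_pyRange_one]
        refine ⟨h2, ?_⟩
        have := (sq_le_iff_le_sqrt n hn0 d (by omega)).2 hdd
        omega
      have := h d hmem
      rw [Bool.not_eq_eq_eq_not, Bool.not_true, beq_eq_false_iff_ne] at this
      exact this ((PySem.Int.mod_eq_zero_iff_dvd n d).2 hdvd)
    · rintro ⟨-, h⟩ i hi
      rw [PySem.List.mem_pyRange_one] at hi
      rw [Bool.not_eq_eq_eq_not, Bool.not_true, beq_eq_false_iff_ne]
      intro hmod
      exact h i hi.1 ((sq_le_iff_le_sqrt n hn0 i (by omega)).1 (by omega))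
        ((PySem.Int.mod_eq_zero_iff_dvd n i).1 hmod)

theorem noSmallDiv_iff_prime (n : Int) (hn : 2 ≤ n) : NoSmallDiv n ↔ n.toNat.Prime := by
  unfold NoSmallDiv
  have hn2 : 2 ≤ n.toNat := by omega
  constructor
  · intro h
    by_contra hp
    have hpos : 0 < n.toNat := by omega
    have hsq := Nat.minFac_sq_le_self hpos hp
    have hprime := Nat.minFac_prime (n := n.toNat) (by omega)
    have hdvd := Nat.minFac_dvd n.toNat
    have h2 := hprime.two_le
    refine h (n.toNat.minFac : Int) (by exact_mod_cast h2) ?_ ?_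
    · have : (n.toNat.minFac * n.toNat.minFac : Nat) ≤ n.toNat := by
        simpa [pow_two] using hsq
      calc ((n.toNat.minFac : Int) * n.toNat.minFac) = ((n.toNat.minFac * n.toNat.minFac : Nat) : Int) := by push_cast; ring
      _ ≤ (n.toNat : Int) := by exact_mod_cast this
      _ = n := by omega
    · have : ((n.toNat.minFac : Int)) ∣ ((n.toNat : Int)) := Int.natCast_dvd_natCast.2 hdvd
      rwa [Int.toNat_of_nonneg (by omega)] at this
  · intro hp d hd2 hdd hdvd
    have hd0 : 0 ≤ d := by omega
    have hdn : d.toNat ∣ n.toNat := by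
      have : d ∣ ((n.toNat : Int)) := by rwa [Int.toNat_of_nonneg (by omega)]
      rw [← Int.toNat_of_nonneg hd0] at this
      exact_mod_cast this
    rcases (Nat.Prime.eq_one_or_self_of_dvd hp _ hdn) with h1 | h1
    · omega
    · have : d = n := by omega
      subst this
      nlinarith

-- A's accumulation loop: membership and nodup
theorem foldlA_mem (l : List Int) (acc : List Int) (x : Int) :
    x ∈ l.foldl
      (fun result num =>
        if !(result.contains num) && isPrimeA num then result ++ [num] else result)
      acc ↔ x ∈ acc ∨ (x ∈ l ∧ isPrimeA x = true) := by
  induction l generalizing acc with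
  | nil => simp
  | cons a t ih =>
    simp only [List.foldl_cons]
    cases hb : (!(acc.contains a) && isPrimeA a)
    · have hb' : a ∉ acc → isPrimeA a = false := by simpa using hb
      simp only [Bool.false_eq_true, if_false, ih, List.mem_cons]
      constructor
      · rintro (h | ⟨h, hp⟩)
        · exact Or.inl h
        · exact Or.inr ⟨Or.inr h, hp⟩
      · rintro (h | ⟨rfl | h, hp⟩)
        · exact Or.inl h
        · by_cases hm : x ∈ acc
          · exact Or.inl hm
          · simp [hb' hm] at hp
        · exact Or.inr ⟨h, hp⟩
    · have hb' : a ∉ acc ∧ isPrimeA a = true := by simpa using hb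
      simp only [if_true, ih, List.mem_append, List.mem_cons,
        List.not_mem_nil, or_false]
      constructor
      · rintro ((h | rfl) | ⟨h, hp⟩)
        · exact Or.inl h
        · exact Or.inr ⟨Or.inl rfl, hb'.2⟩
        · exact Or.inr ⟨Or.inr h, hp⟩
      · rintro (h | ⟨rfl | h, hp⟩)
        · exact Or.inl (Or.inl h)
        · exact Or.inl (Or.inr rfl)
        · exact Or.inr ⟨h, hp⟩

theorem foldlA_nodup (l : List Int) (acc : List Int) (h : acc.Nodup) :
    (l.foldl
      (fun result num =>
        if !(result.contains num) && isPrimeA num then result ++ [num] else result)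
      acc).Nodup := by
  induction l generalizing acc with
  | nil => exact h
  | cons a t ih =>
    simp only [List.foldl_cons]
    cases hb : (!(acc.contains a) && isPrimeA a)
    · simp only [Bool.false_eq_true, if_false]
      exact ih acc h
    · have hna : a ∉ acc ∧ isPrimeA a = true := by simpa using hb
      simp only [if_true]
      refine ih _ ?_
      rw [List.nodup_append]
      refine ⟨h, List.nodup_singleton a, fun y hy z hz hyz => ?_⟩
      rw [List.mem_singleton] at hz
      exact hna.1 (by rw [← hz, ← hyz]; exact hy)

-- the isqrt loop computes the bracket limit² ≤ m < (limit+1)²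
theorem isqrtLoop_bracket (m l : Int) (hl : 0 ≤ l) (h : l * l ≤ m) :
    0 ≤ isqrtLoop m l ∧ isqrtLoop m l * isqrtLoop m l ≤ m ∧
      m < (isqrtLoop m l + 1) * (isqrtLoop m l + 1) := by
  revert hl h
  induction l using isqrtLoop.induct (m := m) with
  | case1 l hg ih =>
    intro hl h
    rw [isqrtLoop, dif_pos hg]
    exact ih (by omega) hg
  | case2 l hg =>
    intro hl h
    rw [isqrtLoop, dif_neg hg]
    exact ⟨hl, h, by omega⟩

-- marking one row: the cell i is false afterwards iff it was false or i occurs in js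
theorem foldl_set_getD (js : List Int) (s : List Bool) (i : Nat) :
    (js.foldl (fun a j => a.set j.toNat false) s).getD i false =
      (decide (¬ ∃ j ∈ js, j.toNat = i) && s.getD i false) := by
  induction js generalizing s with
  | nil => simp
  | cons j t ih =>
    simp only [List.foldl_cons, ih, List.mem_cons]
    have hset : (s.set j.toNat false).getD i false = (decide (¬ j.toNat = i) && s.getD i false) := by
      rw [List.getD_eq_getElem?_getD, List.getD_eq_getElem?_getD, List.getElem?_set]
      by_cases hji : j.toNat = i
      · simp only [hji, if_true]
        split_ifs <;> simp
      · simp [hji]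
    rw [hset]
    by_cases h1 : j.toNat = i <;> by_cases h2 : ∃ x ∈ t, x.toNat = i <;>
      simp [h1, h2]

-- marking one row on the array side is marking it on the underlying list
theorem foldl_setIfInBounds_toList (js : List Int) (s : Array Bool) :
    (js.foldl (fun a j => a.setIfInBounds j.toNat false) s).toList =
      js.foldl (fun l j => l.set j.toNat false) s.toList := by
  induction js generalizing s with
  | nil => rfl
  | cons j t ih => simp only [List.foldl_cons, ih, Array.toList_setIfInBounds]

-- the sieve loop: cell i survives iff it was true and no e ≥ d marks it
theorem sieveLoop_getD (limit : Int) (s : Array Bool) (d : Int) (hd : 2 ≤ d) (i : Nat) :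
    ((sieveLoop limit s d).toList.getD i false = true ↔
      s.toList.getD i false = true ∧
        ∀ e : Int, d ≤ e → e * e ≤ limit → ¬ (e ∣ (i : Int) ∧ e * e ≤ (i : Int) ∧ (i : Int) ≤ limit)) := by
  revert hd
  induction s, d using sieveLoop.induct (limit := limit) with
  | case1 s d hg ih =>
    intro hd
    rw [sieveLoop, dif_pos hg, ih (by omega), foldl_setIfInBounds_toList, foldl_set_getD]
    have hrow : (∃ j ∈ PySem.List.pyRange (d * d) (limit + 1) d, j.toNat = i) ↔
        (d ∣ (i : Int) ∧ d * d ≤ (i : Int) ∧ (i : Int) ≤ limit) := by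
      constructor
      · rintro ⟨j, hj, rfl⟩
        rw [PySem.List.mem_pyRange_iff_of_pos (by omega)] at hj
        have hj0 : (0:Int) ≤ j := le_trans (by positivity) hj.1
        rw [Int.toNat_of_nonneg hj0]
        obtain ⟨hj1, hj2, hj3⟩ := hj
        refine ⟨?_, hj1, by omega⟩
        have := dvd_add hj3 (Dvd.intro d (rfl : d * d = d * d))
        simpa using this
      · rintro ⟨h1, h2, h3⟩
        refine ⟨(i : Int), ?_, by omega⟩
        rw [PySem.List.mem_pyRange_iff_of_pos (by omega)]
        exact ⟨h2, by omega, dvd_sub h1 (Dvd.intro d rfl)⟩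
    rw [Bool.and_eq_true, decide_eq_true_iff, hrow]
    constructor
    · rintro ⟨⟨hnd, hs⟩, hall⟩
      refine ⟨hs, fun e he hee => ?_⟩
      rcases eq_or_lt_of_le he with rfl | hlt
      · exact hnd
      · exact hall e (by omega) hee
    · rintro ⟨hs, hall⟩
      exact ⟨⟨hall d le_rfl hg, hs⟩, fun e he hee => hall e (by omega) hee⟩
  | case2 s d hg =>
    intro hd
    rw [sieveLoop, dif_neg hg]
    constructor
    · intro hs
      refine ⟨hs, fun e he hee => absurd hee ?_⟩
      have : d * d ≤ e * e := mul_le_mul he he (by omega) (by omega)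
      omega
    · exact fun h => h.1

-- keepLoop on a strictly increasing list of values ≥ 2
theorem keepLoop_iff (v : Int) (ps : List Int) (hps : ps.Pairwise (· < ·))
    (hpos : ∀ p ∈ ps, 2 ≤ p) :
    keepLoop v ps = true ↔ ∀ p ∈ ps, p * p ≤ v → ¬ p ∣ v := by
  induction ps with
  | nil => simp [keepLoop]
  | cons p t ih =>
    have hp2 : 2 ≤ p := hpos p List.mem_cons_self
    rw [keepLoop]
    by_cases hbig : p * p > v
    · simp only [hbig, if_true, true_iff]
      intro q hq hqq
      rcases List.mem_cons.1 hq with rfl | hqt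
      · omega
      · exfalso
        have hpq : p < q := (List.pairwise_cons.1 hps).1 q hqt
        have : p * p ≤ q * q := mul_le_mul (by omega) (by omega) (by omega) (by omega)
        omega
    · simp only [hbig, if_false]
      by_cases hmod : PySem.Int.mod v p == 0
      · simp only [hmod, if_true, Bool.false_eq_true, false_iff]
        intro hall
        exact hall p List.mem_cons_self (by omega)
          ((PySem.Int.mod_eq_zero_iff_dvd v p).1 (by simpa using hmod))
      · simp only [hmod, Bool.false_eq_true, if_false]
        rw [ih (List.pairwise_cons.1 hps).2 (fun q hq => hpos q (List.mem_cons_of_mem p hq))]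
        constructor
        · intro h q hq hqq
          rcases List.mem_cons.1 hq with rfl | hqt
          · intro hdvd
            exact absurd (beq_iff_eq.2 ((PySem.Int.mod_eq_zero_iff_dvd v q).2 hdvd)) (by simpa using hmod)
          · exact h q hqt hqq
        · exact fun h q hq hqq => h q (List.mem_cons_of_mem p hq) hqq

-- on a strictly increasing list every member is at most the last element
theorem mem_le_getLast (l : List Int) (h : l.Pairwise (· < ·)) (x : Int) (hx : x ∈ l)
    (hn : l ≠ []) : x ≤ l.getLast hn := by
  have hsplit := List.dropLast_append_getLast hn
  rw [← hsplit] at h hx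
  rcases List.mem_append.1 hx with hx1 | hx1
  · have := (List.pairwise_append.1 h).2.2 x hx1 (l.getLast hn) (by simp)
    omega
  · rw [List.mem_singleton] at hx1
    omega

-- B's per-candidate test agrees with primality for 2 ≤ v ≤ m
theorem keep_iff_noSmallDiv (m limit : Int) (hb : 0 ≤ limit ∧ limit * limit ≤ m ∧ m < (limit + 1) * (limit + 1))
    (primes : List Int)
    (hmem : ∀ p : Int, p ∈ primes ↔ 2 ≤ p ∧ p ≤ limit ∧ NoSmallDiv p)
    (hps : primes.Pairwise (· < ·))
    (v : Int) (hv : 2 ≤ v) (hvm : v ≤ m) :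
    keepLoop v primes = true ↔ NoSmallDiv v := by
  obtain ⟨hl0, hlm, hml⟩ := hb
  rw [keepLoop_iff v primes hps (fun p hp => ((hmem p).1 hp).1)]
  constructor
  · intro h
    by_contra hnd
    have hnp : ¬ v.toNat.Prime := fun hp => hnd ((noSmallDiv_iff_prime v hv).2 hp)
    have hpos : 0 < v.toNat := by omega
    have hsq := Nat.minFac_sq_le_self hpos hnp
    have hprime := Nat.minFac_prime (n := v.toNat) (by omega)
    have h2 := hprime.two_le
    set f : Int := (v.toNat.minFac : Int) with hf
    have hf2 : 2 ≤ f := by rw [hf]; exact_mod_cast h2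
    have hffv : f * f ≤ v := by
      have : (v.toNat.minFac * v.toNat.minFac : Nat) ≤ v.toNat := by simpa [pow_two] using hsq
      calc f * f = ((v.toNat.minFac * v.toNat.minFac : Nat) : Int) := by rw [hf]; push_cast; ring
      _ ≤ (v.toNat : Int) := by exact_mod_cast this
      _ = v := by omega
    have hfdvd : f ∣ v := by
      have : f ∣ ((v.toNat : Int)) := Int.natCast_dvd_natCast.2 (Nat.minFac_dvd v.toNat)
      rwa [Int.toNat_of_nonneg (by omega)] at this
    have hflim : f ≤ limit := by
      by_contra hgt
      have hge : limit + 1 ≤ f := by omega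
      have : (limit + 1) * (limit + 1) ≤ f * f := mul_le_mul hge hge (by omega) (by omega)
      omega
    have hfnd : NoSmallDiv f := by
      rw [noSmallDiv_iff_prime f hf2]
      have : f.toNat = v.toNat.minFac := by rw [hf]; omega
      rwa [this]
    exact h f ((hmem f).2 ⟨hf2, hflim, hfnd⟩) hffv hfdvd
  · intro h p hp hpv
    exact h p ((hmem p).1 hp).1 hpv

-- ===== VERDICT (by name: the statement is the Claim_ definition above) =====
theorem remove_duplicates_primes_spec : Claim_equal_remove_duplicates_primes := by
  intro arr _
  unfold Spec_remove_duplicates_primes remove_duplicates_primes remove_duplicates_primes_alt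
  set candidates := PySem.List.sorted (PySem.Set.ofList (arr.filter (fun v => 2 ≤ v))) (fun x => x) false with hcdef
  have hcand_mem : ∀ x : Int, x ∈ candidates ↔ x ∈ arr ∧ 2 ≤ x := by
    intro x
    rw [hcdef, PySem.List.mem_sorted, PySem.Set.mem_ofList, List.mem_filter]
    simp
  have hcand_pair : candidates.Pairwise (· < ·) :=
    PySem.List.sorted_ofList_pairwise_lt (arr.filter (fun v => 2 ≤ v))
  by_cases hc : candidates = []
  · rw [dif_pos hc]
    have hfold : (arr.foldl
        (fun result num =>
          if !(result.contains num) && isPrimeA num then result ++ [num] else result)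
        []) = [] := by
      rw [List.eq_nil_iff_forall_not_mem]
      intro x hx
      rcases (foldlA_mem arr [] x).1 hx with h | ⟨hxa, hxp⟩
      · simp at h
      · have h2 : 2 ≤ x := ((isPrimeA_iff x).1 hxp).1
        have : x ∈ candidates := (hcand_mem x).2 ⟨hxa, h2⟩
        rw [hc] at this; simp at this
    rw [hfold]
    exact PySem.List.sorted_eq_of_perm_of_pairwise_lt [] [] (fun x => x) (List.Perm.refl _) (by simp)
  · rw [dif_neg hc]
    set m : Int := candidates.getLast hc with hmdef
    have hm2 : 2 ≤ m := ((hcand_mem m).1 (List.getLast_mem hc)).2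
    have hb := isqrtLoop_bracket m 0 le_rfl (by omega)
    set limit : Int := isqrtLoop m 0 with hldef
    obtain ⟨hl0, hlm, hml⟩ := hb
    set sieve : Array Bool := sieveLoop limit (List.replicate (limit + 1).toNat true).toArray 2 with hsdef
    have hgetD : ∀ (a : Array Bool) (i : Nat), a.getD i false = a.toList.getD i false := by
      intro a i
      rw [List.getD_eq_getElem?_getD, Array.getElem?_toList, Array.getD_eq_getD_getElem?]
    have hsieve : ∀ i : Nat, (sieve.getD i false = true ↔
        (i < (limit + 1).toNat) ∧
          ∀ e : Int, 2 ≤ e → e * e ≤ limit →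
            ¬ (e ∣ (i : Int) ∧ e * e ≤ (i : Int) ∧ (i : Int) ≤ limit)) := by
      intro i
      rw [hgetD, hsdef, sieveLoop_getD limit _ 2 le_rfl i, List.toList_toArray]
      have hrep : (List.replicate (limit + 1).toNat true).getD i false = decide (i < (limit + 1).toNat) := by
        rw [List.getD_eq_getElem?_getD, List.getElem?_replicate]
        split_ifs with h <;> simp [h]
      rw [hrep]
      simp
    set primes : List Int := (PySem.List.pyRange 2 (limit + 1) 1).filter
        (fun i => sieve.getD i.toNat false) with hpdef
    have hprimes_mem : ∀ p : Int, p ∈ primes ↔ 2 ≤ p ∧ p ≤ limit ∧ NoSmallDiv p := by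
      intro p
      rw [hpdef, List.mem_filter, PySem.List.mem_pyRange_one]
      constructor
      · rintro ⟨⟨hp2, hpl⟩, hpt⟩
        have hpn : ((p.toNat : Int)) = p := by omega
        rw [hsieve p.toNat, hpn] at hpt
        refine ⟨hp2, by omega, fun d hd2 hdd hdvd => ?_⟩
        exact hpt.2 d hd2 (by omega) ⟨hdvd, hdd, by omega⟩
      · rintro ⟨hp2, hpl, hnd⟩
        refine ⟨⟨hp2, by omega⟩, ?_⟩
        have hpn : ((p.toNat : Int)) = p := by omega
        rw [hsieve p.toNat, hpn]
        refine ⟨by omega, fun e he2 heel ⟨hdvd, hee, hpl'⟩ => hnd e he2 hee hdvd⟩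
    have hprimes_pair : primes.Pairwise (· < ·) := by
      have hr : (PySem.List.pyRange 2 (limit + 1) 1).Pairwise (· < ·) := by
        rw [PySem.List.pyRange_of_pos 2 (limit + 1) one_pos]
        refine List.Pairwise.map _ (fun a b hab => by omega) ?_
        exact List.pairwise_lt_range.imp (fun h => by omega)
      exact List.Pairwise.sublist List.filter_sublist hr
    have hkeep : ∀ v ∈ candidates, (keepLoop v primes = true ↔ NoSmallDiv v) := by
      intro v hv
      have hv2 : 2 ≤ v := ((hcand_mem v).1 hv).2
      have hvm : v ≤ m := mem_le_getLast candidates hcand_pair v hv hc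
      exact keep_iff_noSmallDiv m limit ⟨hl0, hlm, hml⟩ primes hprimes_mem hprimes_pair v hv2 hvm
    set R : List Int := candidates.filter (fun v => keepLoop v primes) with hRdef
    have hpairR : R.Pairwise (· < ·) := List.Pairwise.sublist List.filter_sublist hcand_pair
    have hnodupR : R.Nodup := hpairR.imp (fun h => ne_of_lt h)
    have hmemR : ∀ x : Int, x ∈ R ↔ x ∈ arr ∧ isPrimeA x = true := by
      intro x
      rw [hRdef, List.mem_filter]
      constructor
      · rintro ⟨hxc, hxk⟩
        have h2 := (hcand_mem x).1 hxc
        exact ⟨h2.1, (isPrimeA_iff x).2 ⟨h2.2, (hkeep x hxc).1 hxk⟩⟩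
      · rintro ⟨hxa, hxp⟩
        obtain ⟨h2, hnd⟩ := (isPrimeA_iff x).1 hxp
        have hxc : x ∈ candidates := (hcand_mem x).2 ⟨hxa, h2⟩
        exact ⟨hxc, (hkeep x hxc).2 hnd⟩
    have hnodupL : (arr.foldl
        (fun result num =>
          if !(result.contains num) && isPrimeA num then result ++ [num] else result)
        []).Nodup := foldlA_nodup arr [] List.nodup_nil
    have hperm : R.Perm (arr.foldl
        (fun result num =>
          if !(result.contains num) && isPrimeA num then result ++ [num] else result)
        []) := by
      rw [List.perm_ext_iff_of_nodup hnodupR hnodupL]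
      intro x
      rw [hmemR x, foldlA_mem arr [] x]
      simp
    exact PySem.List.sorted_eq_of_perm_of_pairwise_lt _ _ _ hperm hpairR
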